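-- pv_equiv track=rewrite | github.com/Jane11111/Leetcode2021 | Ali001.py | solve
-- ===== SOURCE A (Python) =====
-- def solve(arr):
--     L = sum(arr)
--
--     dic = {}
--
--     sum_val = 0
--     sum_dic = {}
--     for i in range(len(arr)):
--
--         num = arr[i]
--         sum_val += num
--         sum_dic[i] = sum_val
--
--         if sum_val not in dic:
--             dic[sum_val] = True
--
--         for j in range(i):
--
--             tmp = sum_val - sum_dic[j]
--             if tmp not in dic:
--                 dic[tmp] = True
--     return 0 not in dic and len(dic) == L
-- ===== SOURCE B (Python) =====
-- def solve(arr):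
--     L = sum(arr)
--     sums = set()
--     for i in range(len(arr)):
--         s = 0
--         for x in arr[i:]:
--             s += x
--             sums.add(s)
--     return 0 not in sums and len(sums) == L
-- ===== Notes on version B (the rewrite author's own statement) =====
-- stated objective: simpler
-- what changed: Replaces A's prefix-sum dictionary (sum_dic) and a dict-as-set of differences with a direct running accumulator per start index that adds each subarray sum to a set; no dictionary and no subtraction remain.
import Mathlib
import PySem

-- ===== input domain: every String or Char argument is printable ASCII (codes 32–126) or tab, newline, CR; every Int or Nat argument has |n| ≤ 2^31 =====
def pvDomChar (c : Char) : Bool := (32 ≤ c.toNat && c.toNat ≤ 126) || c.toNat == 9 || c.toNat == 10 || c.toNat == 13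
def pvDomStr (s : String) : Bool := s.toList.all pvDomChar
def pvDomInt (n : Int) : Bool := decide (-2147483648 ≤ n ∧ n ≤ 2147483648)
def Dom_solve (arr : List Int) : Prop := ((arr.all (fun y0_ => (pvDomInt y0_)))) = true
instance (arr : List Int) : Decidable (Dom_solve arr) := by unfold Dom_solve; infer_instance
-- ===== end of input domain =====

-- B replaces A's prefix-sum dictionary and dict-as-set of differences with a running accumulator
-- per start index feeding a set of subarray sums (objective: simpler; same O(n^2) cost).


-- ===== PORT A =====
-- loop body of A's outer 'for i in range(len(arr))'; state = (dic, sum_val, sum_dic)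
def solveStep (arr : List Int)
    (st : PySem.Dict Int Bool × Int × PySem.Dict Int Int) (i : Nat) :
    PySem.Dict Int Bool × Int × PySem.Dict Int Int :=
  let dic := st.1
  let sum_val := st.2.1
  let sum_dic := st.2.2
  let num := arr.getD i 0
  let sum_val := sum_val + num
  let sum_dic := sum_dic.insert (i : Int) sum_val
  let dic := if dic.contains sum_val then dic else dic.insert sum_val true
  let dic := (List.range i).foldl
    (fun dic (j : Nat) =>
      let tmp := sum_val - sum_dic.getD (j : Int) 0
      if dic.contains tmp then dic else dic.insert tmp true) dic
  (dic, sum_val, sum_dic)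

def solve (arr : List Int) : Bool :=
  let L := arr.sum
  let st := (List.range arr.length).foldl (solveStep arr)
      (PySem.Dict.empty, 0, PySem.Dict.empty)
  !(st.1.contains 0) && decide ((st.1.size : Int) = L)

-- ===== PORT B =====
-- loop body of B's outer 'for i in range(len(arr))': running sum over arr[i:] feeding the set
def solveAltStep (arr : List Int) (sums : PySem.Set Int) (i : Nat) : PySem.Set Int :=
  ((PySem.List.slice arr (some (i : Int)) none).foldl
    (fun (p : PySem.Set Int × Int) x =>
      (PySem.Set.add p.1 (p.2 + x), p.2 + x)) (sums, 0)).1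

def solve_alt (arr : List Int) : Bool :=
  let L := arr.sum
  let sums := (List.range arr.length).foldl (solveAltStep arr) PySem.Set.empty
  !(PySem.Set.contains sums 0) && decide (PySem.Set.len sums = L)

-- ===== PRECONDITION & SPEC =====
def Spec_solve (arr : List Int) (out : Bool) : Prop := out = solve_alt arr
instance (arr : List Int) (out : Bool) : Decidable (Spec_solve arr out) := by unfold Spec_solve; infer_instance

-- ===== CLAIM (what is proved, stated in full; the proofs are below) =====
def Claim_equal_solve : Prop := ∀ (arr : List Int), Dom_solve arr → Spec_solve arr (solve arr)

-- ===== LEMMAS AND PROOFS =====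

-- prefix sum of the first k elements
def pfx (arr : List Int) (k : Nat) : Int := (arr.take k).sum

theorem pfx_succ (arr : List Int) (m : Nat) (h : m < arr.length) :
    pfx arr (m + 1) = pfx arr m + arr.getD m 0 := by
  show (arr.take (m + 1)).sum = (arr.take m).sum + arr.getD m 0
  rw [List.take_add_one, List.sum_append]
  simp [List.getD, List.getElem?_eq_getElem h]

theorem pfx_drop (arr : List Int) (i k : Nat) :
    ((arr.drop i).take k).sum = pfx arr (i + k) - pfx arr i := by
  have : arr.take (i + k) = arr.take i ++ (arr.drop i).take k := List.take_add ..
  simp [pfx, this]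

-- keys of A's guarded insert are a Set.add on the keys
theorem keys_gins (d : PySem.Dict Int Bool) (k : Int) :
    (if d.contains k then d else d.insert k true).keys = PySem.Set.add d.keys k := by
  by_cases h : d.contains k = true
  · rw [if_pos h, PySem.Set.add_of_mem ((PySem.Dict.contains_iff_mem_keys d k).mp h)]
  · have h' : d.contains k = false := by simpa using h
    rw [if_neg (by simp [h']), PySem.Dict.keys_insert_of_not_contains d true h',
      PySem.Set.add_of_not_mem]
    intro hm
    exact h ((PySem.Dict.contains_iff_mem_keys d k).mpr hm)

theorem keys_foldl_gins (f : Nat → Int) :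
    ∀ (l : List Nat) (d : PySem.Dict Int Bool),
      ((l.foldl (fun d j => if d.contains (f j) then d else d.insert (f j) true) d).keys)
        = PySem.Set.update d.keys (l.map f) := by
  intro l
  induction l with
  | nil => intro d; simp [PySem.Set.update_nil]
  | cons j t ih =>
    intro d
    rw [List.foldl_cons, ih, List.map_cons, PySem.Set.update_cons, keys_gins]

-- B's inner fold: membership and nodup
theorem altInner_mem (ys : List Int) :
    ∀ (S : PySem.Set Int) (c : Int) (x : Int),
      x ∈ (ys.foldl (fun (p : PySem.Set Int × Int) y =>
            (PySem.Set.add p.1 (p.2 + y), p.2 + y)) (S, c)).1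
        ↔ x ∈ S ∨ ∃ k : Nat, k < ys.length ∧ x = c + (ys.take (k + 1)).sum := by
  induction ys with
  | nil => intro S c x; simp
  | cons y t ih =>
    intro S c x
    rw [List.foldl_cons]
    rw [ih]
    rw [PySem.Set.mem_add]
    constructor
    · rintro ((hS | rfl) | ⟨k, hk, rfl⟩)
      · exact Or.inl hS
      · exact Or.inr ⟨0, by simp⟩
      · refine Or.inr ⟨k + 1, by simpa using hk, ?_⟩
        simp [List.take_succ_cons]
        ring
    · rintro (hS | ⟨k, hk, rfl⟩)
      · exact Or.inl (Or.inl hS)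
      · cases k with
        | zero => exact Or.inl (Or.inr (by simp))
        | succ k' =>
          refine Or.inr ⟨k', by simpa using hk, ?_⟩
          simp [List.take_succ_cons]
          ring

theorem altInner_nodup (ys : List Int) :
    ∀ (S : PySem.Set Int) (c : Int), S.Nodup →
      ((ys.foldl (fun (p : PySem.Set Int × Int) y =>
          (PySem.Set.add p.1 (p.2 + y), p.2 + y)) (S, c)).1).Nodup := by
  induction ys with
  | nil => intro S c h; simpa
  | cons y t ih =>
    intro S c h
    rw [List.foldl_cons]
    exact ih _ _ (PySem.Set.nodup_add _ _ h)

-- A-side invariant after folding over range m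
theorem solveA_inv (arr : List Int) :
    ∀ m : Nat, m ≤ arr.length →
      ((List.range m).foldl (solveStep arr) (PySem.Dict.empty, 0, PySem.Dict.empty)).2.1
          = pfx arr m ∧
      (∀ j : Nat, j < m →
        ((List.range m).foldl (solveStep arr) (PySem.Dict.empty, 0, PySem.Dict.empty)).2.2.getD (j : Int) 0
          = pfx arr (j + 1)) ∧
      ((List.range m).foldl (solveStep arr) (PySem.Dict.empty, 0, PySem.Dict.empty)).1.keys.Nodup ∧
      (∀ x : Int,
        x ∈ ((List.range m).foldl (solveStep arr) (PySem.Dict.empty, 0, PySem.Dict.empty)).1.keys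
          ↔ ∃ a b : Nat, a < b ∧ b ≤ m ∧ x = pfx arr b - pfx arr a) := by
  intro m
  induction m with
  | zero =>
    intro _
    refine ⟨by simp [pfx], by intro j hj; exact absurd hj (by omega), by simp [PySem.Dict.keys_empty], ?_⟩
    intro x
    simp only [List.range_zero, List.foldl_nil, PySem.Dict.keys_empty, List.not_mem_nil,
      false_iff]
    rintro ⟨a, b, hab, hb, _⟩
    omega
  | succ m ih =>
    intro hm
    obtain ⟨h1, h2, h3, h4⟩ := ih (by omega)
    rw [List.range_succ, List.foldl_append, List.foldl_cons, List.foldl_nil]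
    set st := (List.range m).foldl (solveStep arr) (PySem.Dict.empty, 0, PySem.Dict.empty) with hst
    have hmlt : m < arr.length := by omega
    have hsv : st.2.1 + arr.getD m 0 = pfx arr (m + 1) := by
      rw [h1, pfx_succ arr m hmlt]
    simp only [solveStep]
    rw [hsv]
    -- getD facts for the updated sum_dic
    have hget : ∀ j : Nat, j < m + 1 →
        (st.2.2.insert (m : Int) (pfx arr (m + 1))).getD (j : Int) 0 = pfx arr (j + 1) := by
      intro j hj
      by_cases hjm : j = m
      · subst hjm; rw [PySem.Dict.getD_insert_self]
      · have : (j : Int) ≠ (m : Int) := by exact_mod_cast hjm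
        rw [PySem.Dict.getD_insert_of_ne _ _ _ this, h2 j (by omega)]
    refine ⟨rfl, hget, ?_, ?_⟩
    · simp only [keys_foldl_gins, keys_gins]
      exact PySem.Set.nodup_update _ _ (PySem.Set.nodup_add _ _ h3)
    · intro x
      simp only [keys_foldl_gins, keys_gins]
      rw [PySem.Set.mem_update, PySem.Set.mem_add, h4]
      simp only [List.mem_map, List.mem_range]
      constructor
      · rintro ((⟨a, b, hab, hb, rfl⟩ | rfl) | ⟨j, hj, rfl⟩)
        · exact ⟨a, b, hab, by omega, rfl⟩
        · exact ⟨0, m + 1, by omega, by omega, by simp [pfx]⟩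
        · exact ⟨j + 1, m + 1, by omega, by omega, by rw [hget j (by omega)]⟩
      · rintro ⟨a, b, hab, hb, rfl⟩
        by_cases hbm : b ≤ m
        · exact Or.inl (Or.inl ⟨a, b, hab, hbm, rfl⟩)
        · have hbeq : b = m + 1 := by omega
          subst hbeq
          by_cases ha0 : a = 0
          · subst ha0; exact Or.inl (Or.inr (by simp [pfx]))
          · refine Or.inr ⟨a - 1, by omega, ?_⟩
            rw [hget (a - 1) (by omega)]
            have h' : a - 1 + 1 = a := by omega
            rw [h']

-- B-side invariant after folding over range m
theorem solveB_inv (arr : List Int) :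
    ∀ m : Nat, m ≤ arr.length →
      ((List.range m).foldl (solveAltStep arr) PySem.Set.empty).Nodup ∧
      (∀ x : Int,
        x ∈ (List.range m).foldl (solveAltStep arr) PySem.Set.empty
          ↔ ∃ a b : Nat, a < b ∧ b ≤ arr.length ∧ a < m ∧ x = pfx arr b - pfx arr a) := by
  intro m
  induction m with
  | zero =>
    intro _
    refine ⟨by simp [PySem.Set.empty], ?_⟩
    intro x
    simp only [List.range_zero, List.foldl_nil]
    constructor
    · intro h; exact absurd h (by simp [PySem.Set.empty])
    · rintro ⟨a, b, _, _, h, _⟩; omega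
  | succ m ih =>
    intro hm
    obtain ⟨h1, h2⟩ := ih (by omega)
    rw [List.range_succ, List.foldl_append, List.foldl_cons, List.foldl_nil]
    set S := (List.range m).foldl (solveAltStep arr) PySem.Set.empty with hS
    simp only [solveAltStep, PySem.List.slice_from_natCast]
    refine ⟨altInner_nodup _ _ _ h1, ?_⟩
    intro x
    rw [altInner_mem (arr.drop m) S 0 x, h2]
    have hlen : (arr.drop m).length = arr.length - m := List.length_drop ..
    constructor
    · rintro (⟨a, b, hab, hb, ha, rfl⟩ | ⟨k, hk, rfl⟩)
      · exact ⟨a, b, hab, hb, by omega, rfl⟩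
      · rw [pfx_drop]
        exact ⟨m, m + (k + 1), by omega, by omega, by omega, by ring⟩
    · rintro ⟨a, b, hab, hb, ha, rfl⟩
      by_cases ham : a < m
      · exact Or.inl ⟨a, b, hab, hb, ham, rfl⟩
      · have haeq : a = m := by omega
        subst haeq
        refine Or.inr ⟨b - a - 1, by omega, ?_⟩
        rw [pfx_drop]
        have : a + (b - a - 1 + 1) = b := by omega
        rw [this]
        ring

-- ===== VERDICT (by name: the statement is the Claim_ definition above) =====
theorem solve_spec : Claim_equal_solve := by
  intro arr _
  show solve arr = solve_alt arr
  simp only [solve, solve_alt]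
  set stA := (List.range arr.length).foldl (solveStep arr)
      (PySem.Dict.empty, 0, PySem.Dict.empty) with hstA
  set sums := (List.range arr.length).foldl (solveAltStep arr) PySem.Set.empty with hsums
  obtain ⟨_, _, hndA, hmemA⟩ := solveA_inv arr arr.length le_rfl
  obtain ⟨hndB, hmemB⟩ := solveB_inv arr arr.length le_rfl
  have hmem : ∀ x : Int, x ∈ stA.1.keys ↔ x ∈ sums := by
    intro x
    rw [hmemA, hmemB]
    constructor
    · rintro ⟨a, b, hab, hb, rfl⟩; exact ⟨a, b, hab, hb, by omega, rfl⟩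
    · rintro ⟨a, b, hab, hb, _, rfl⟩; exact ⟨a, b, hab, hb, rfl⟩
  have hperm : stA.1.keys.Perm sums := (List.perm_ext_iff_of_nodup hndA hndB).mpr hmem
  have hc : stA.1.contains 0 = PySem.Set.contains sums 0 := by
    rw [Bool.eq_iff_iff, PySem.Dict.contains_iff_mem_keys, PySem.Set.contains_iff]
    exact hmem 0
  have hsz : (stA.1.size : Int) = PySem.Set.len sums := by
    have h1 : stA.1.size = stA.1.keys.length := by
      simp [PySem.Dict.size, PySem.Dict.keys]
    have h2 : PySem.Set.len sums = (sums.length : Int) := by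
      simp [PySem.Set.len]
    rw [h1, h2, hperm.length_eq]
  rw [hc, hsz]
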